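-- pv_equiv track=rewrite | github.com/AkihikoTakahashi/ProjectEuler | Problem095.py | calc_sum_divisors
-- ===== SOURCE A (Python) =====
-- def calc_sum_divisors(n, include_n=False):
--     def prime_pow_sum(n, p):
--         s = 1
--         while n % p == 0:
--             n //= p
--             s = s * p + 1
--         return s, n
--
--     nums = [i for i in range(n)]
--     factors = [1] * n
--
--     for p in filter(lambda p: nums[p] == p, range(2, int(n**0.5) + 1)):
--         for j in range(p, n, p):
--             s, m = prime_pow_sum(nums[j], p)
--             nums[j] = m
--             factors[j] *= s
--
--     for i in range(2, n):
--         if nums[i] != 1: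
--             factors[i] *= (nums[i] + 1)
--         if not include_n:
--             factors[i] -= i
--     return factors
-- ===== SOURCE B (Python) =====
-- def calc_sum_divisors(n, include_n=False):
--     factors = [1] * n
--     for d in range(2, n):
--         for j in range(d, n, d):
--             factors[j] += d
--     if not include_n:
--         for i in range(2, n):
--             factors[i] -= i
--     return factors
-- ===== Notes on version B (the rewrite author's own statement) =====
-- stated objective: simpler
-- what changed: A factorises every index with a sqrt-bounded prime sieve plus a while-loop (prime_pow_sum) and multiplies sigma multiplicatively; B replaces all of that by the classic additive divisor-sum sieve (factors[j] += d for every multiple j of every d in range(2,n)) followed by an optional subtraction pass.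
import Mathlib
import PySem

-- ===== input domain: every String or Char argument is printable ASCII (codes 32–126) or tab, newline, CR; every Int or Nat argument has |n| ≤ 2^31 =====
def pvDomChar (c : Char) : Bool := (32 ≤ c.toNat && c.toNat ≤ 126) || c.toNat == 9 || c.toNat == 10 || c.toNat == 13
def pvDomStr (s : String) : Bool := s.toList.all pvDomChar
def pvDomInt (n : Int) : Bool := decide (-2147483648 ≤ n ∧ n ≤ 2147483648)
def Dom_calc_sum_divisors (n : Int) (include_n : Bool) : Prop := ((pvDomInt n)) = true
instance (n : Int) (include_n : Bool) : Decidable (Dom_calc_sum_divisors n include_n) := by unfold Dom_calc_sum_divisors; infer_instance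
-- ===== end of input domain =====

-- B replaces A's prime-factorisation sieve (trial sqrt-bounded prime loop + prime_pow_sum) by the
-- plain additive divisor-sum sieve: simpler, same exact output.

-- ===== PORT A =====
-- the inner 'while n % p == 0' loop of prime_pow_sum; the guard '2 ≤ p ∧ 0 < m' only makes the
-- recursion total (always true at call sites), the Python loop tests exactly 'm % p == 0'
def primePowSumGo (p m s : Int) : Int × Int :=
  if h : 2 ≤ p ∧ 0 < m ∧ PySem.Int.mod m p = 0 then
    primePowSumGo p (PySem.Int.floordiv m p) (s * p + 1)
  else (s, m)
termination_by m.toNat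
decreasing_by
  obtain ⟨hp, hm, hmod⟩ := h
  rw [PySem.Int.floordiv_eq_ediv_of_pos (by omega : (0:Int) < p)]
  have h1 : m / p < m := Int.ediv_lt_of_lt_mul (by omega) (by nlinarith)
  have h2 : 0 ≤ m / p := Int.ediv_nonneg (by omega) (by omega)
  omega

def calc_sum_divisors (n : Int) (include_n : Bool) : List Int :=
  let nums0 := PySem.List.pyRange 0 n 1                 -- [i for i in range(n)]
  let factors0 : List Int := PySem.List.pyRepeat [1] n  -- [1] * n
  -- int(n**0.5): exact as Nat.sqrt on the admitted domain (0 ≤ n ≤ 2^31: float sqrt there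
  -- rounds to a value whose int() is the integer sqrt); n < 0 raises in Python (outside Pre_)
  let limit : Int := (Nat.sqrt n.toNat : Int)
  let st := (PySem.List.pyRange 2 (limit + 1) 1).foldl (fun (st : List Int × List Int) p =>
      if PySem.List.pyGetD st.1 p 0 = p then          -- filter(lambda p: nums[p] == p, …)
        (PySem.List.pyRange p n p).foldl (fun (st2 : List Int × List Int) j =>
          let sm := primePowSumGo p (PySem.List.pyGetD st2.1 j 0) 1
          (PySem.List.pySetD st2.1 j sm.2,
           PySem.List.pySetD st2.2 j (PySem.List.pyGetD st2.2 j 0 * sm.1))) st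
      else st) (nums0, factors0)
  (PySem.List.pyRange 2 n 1).foldl (fun fs i =>
      let fs := if PySem.List.pyGetD st.1 i 0 ≠ 1 then
          PySem.List.pySetD fs i (PySem.List.pyGetD fs i 0 * (PySem.List.pyGetD st.1 i 0 + 1))
        else fs
      if include_n then fs else PySem.List.pySetD fs i (PySem.List.pyGetD fs i 0 - i)) st.2

-- ===== PORT B =====
def calc_sum_divisors_alt (n : Int) (include_n : Bool) : List Int :=
  let factors0 : List Int := PySem.List.pyRepeat [1] n  -- [1] * n
  let factors := (PySem.List.pyRange 2 n 1).foldl (fun fs d =>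
      (PySem.List.pyRange d n d).foldl (fun fs j =>
        PySem.List.pySetD fs j (PySem.List.pyGetD fs j 0 + d)) fs) factors0
  if !include_n then
    (PySem.List.pyRange 2 n 1).foldl (fun fs i =>
      PySem.List.pySetD fs i (PySem.List.pyGetD fs i 0 - i)) factors
  else factors

-- ===== PRECONDITION & SPEC =====
-- Pre_ excludes n < 0, where Python A raises (int((-k)**0.5) is a TypeError on the complex result)
def Pre_calc_sum_divisors (n : Int) (include_n : Bool) : Prop := 0 ≤ n
instance (n : Int) (include_n : Bool) : Decidable (Pre_calc_sum_divisors n include_n) := by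
  unfold Pre_calc_sum_divisors; infer_instance

def pvWitness_calc_sum_divisors : Int × Bool := (12, false)

def Spec_calc_sum_divisors (n : Int) (include_n : Bool) (out : List Int) : Prop :=
  out = calc_sum_divisors_alt n include_n
instance (n : Int) (include_n : Bool) (out : List Int) : Decidable (Spec_calc_sum_divisors n include_n out) := by
  unfold Spec_calc_sum_divisors; infer_instance

-- ===== CLAIM (what is proved, stated in full; the proofs are below) =====
def Claim_equal_calc_sum_divisors : Prop := ∀ (n : Int) (include_n : Bool), Dom_calc_sum_divisors n include_n → Pre_calc_sum_divisors n include_n → Spec_calc_sum_divisors n include_n (calc_sum_divisors n include_n)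

-- ===== LEMMAS AND PROOFS =====

-- σ(m), the full divisor sum
def sigN (m : Nat) : Nat := ∑ d ∈ m.divisors, d

-- the part of i built from its prime factors < k, and the complementary cofactor
def smallP (i k : Nat) : Nat := ∏ p ∈ i.primeFactors.filter (· < k), p ^ i.factorization p
def bigP (i k : Nat) : Nat := i / smallP i k

-- the list both programs maintain, as a map over range
def pvMap (n' : Nat) (g : Nat → Int) : List Int := (List.range n').map g

lemma pvMap_congr {n' : Nat} {g h : Nat → Int} (H : ∀ i, i < n' → g i = h i) :
    pvMap n' g = pvMap n' h := by
  unfold pvMap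
  exact List.map_congr_left (fun i hi => H i (List.mem_range.mp hi))

lemma pvMap_get (n' : Nat) (g : Nat → Int) (j : Int) (h0 : 0 ≤ j) (h1 : j.toNat < n') :
    PySem.List.pyGetD (pvMap n' g) j 0 = g j.toNat := by
  obtain ⟨k, rfl⟩ : ∃ k : Nat, j = (k : Int) := ⟨j.toNat, (Int.toNat_of_nonneg h0).symm⟩
  rw [PySem.List.pyGetD_natCast]
  simp only [Int.toNat_natCast] at h1 ⊢
  rw [List.getD_eq_getElem?_getD]
  unfold pvMap
  rw [List.getElem?_map]
  simp [List.getElem?_range h1]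

lemma pvMap_set (n' : Nat) (g : Nat → Int) (j v : Int) (h0 : 0 ≤ j) (h1 : j.toNat < n') :
    PySem.List.pySetD (pvMap n' g) j v = pvMap n' (fun i => if (i : Int) = j then v else g i) := by
  obtain ⟨k, rfl⟩ : ∃ k : Nat, j = (k : Int) := ⟨j.toNat, (Int.toNat_of_nonneg h0).symm⟩
  simp only [Int.toNat_natCast] at h1
  rw [PySem.List.pySetD_natCast]
  unfold pvMap
  apply List.ext_getElem
  · simp
  · intro i hi hi'
    simp only [List.length_set, List.length_map, List.length_range] at hi
    rw [List.getElem_set]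
    simp only [List.getElem_map, List.getElem_range]
    have hik : ((i : Int) = (k : Int)) ↔ (k = i) := by omega
    by_cases h : k = i
    · simp [h]
    · simp [h, hik]

lemma nodup_pyRange_pos (a b s : Int) (hs : 0 < s) : (PySem.List.pyRange a b s).Nodup := by
  rw [PySem.List.pyRange_of_pos _ _ hs]
  refine List.Nodup.map ?_ (List.nodup_range)
  intro x y h
  have : (x : Int) = y := by
    have := h
    nlinarith [this]
  exact_mod_cast this

-- generic single-list loop: each iteration rewrites exactly index j (a distinct in-range index)
lemma loop1 (n' : Nat) (L : List Int) (F : List Int → Int → List Int) (f : Int → Int → Int)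
    (hnd : L.Nodup) (hbd : ∀ x ∈ L, 0 ≤ x ∧ x.toNat < n')
    (hF : ∀ g (j : Int), 0 ≤ j → j.toNat < n' →
        F (pvMap n' g) j = pvMap n' (fun i => if (i : Int) = j then f j (g i) else g i)) :
    ∀ g, L.foldl F (pvMap n' g) = pvMap n' (fun i => if (i : Int) ∈ L then f i (g i) else g i) := by
  induction L with
  | nil => intro g; simp
  | cons a t ih =>
    intro g
    have ha := hbd a (List.mem_cons_self)
    have hstep : F (pvMap n' g) a = pvMap n' (fun i => if (i : Int) = a then f a (g i) else g i) :=
      hF g a ha.1 ha.2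
    have hnd' : t.Nodup := hnd.of_cons
    have hat : a ∉ t := (List.nodup_cons.mp hnd).1
    rw [List.foldl_cons, hstep,
      ih hnd' (fun x hx => hbd x (List.mem_cons_of_mem _ hx)) (fun i => if (i:Int) = a then f a (g i) else g i)]
    apply pvMap_congr
    intro i _
    by_cases hia : (i : Int) = a
    · simp [hia, hat, List.mem_cons]
    · by_cases hit : (i : Int) ∈ t <;> simp [hia, hit, List.mem_cons]

-- generic pair-of-lists loop
lemma loop2 (n' : Nat) (L : List Int) (F : List Int × List Int → Int → List Int × List Int)
    (f : Int → Int × Int → Int × Int)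
    (hnd : L.Nodup) (hbd : ∀ x ∈ L, 0 ≤ x ∧ x.toNat < n')
    (hF : ∀ gN gF (j : Int), 0 ≤ j → j.toNat < n' →
        F (pvMap n' gN, pvMap n' gF) j =
          (pvMap n' (fun i => if (i : Int) = j then (f j (gN i, gF i)).1 else gN i),
           pvMap n' (fun i => if (i : Int) = j then (f j (gN i, gF i)).2 else gF i))) :
    ∀ gN gF, L.foldl F (pvMap n' gN, pvMap n' gF) =
      (pvMap n' (fun i => if (i : Int) ∈ L then (f i (gN i, gF i)).1 else gN i),
       pvMap n' (fun i => if (i : Int) ∈ L then (f i (gN i, gF i)).2 else gF i)) := by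
  induction L with
  | nil => intro gN gF; simp
  | cons a t ih =>
    intro gN gF
    have ha := hbd a (List.mem_cons_self)
    have hnd' : t.Nodup := hnd.of_cons
    have hat : a ∉ t := (List.nodup_cons.mp hnd).1
    rw [List.foldl_cons, hF gN gF a ha.1 ha.2,
      ih hnd' (fun x hx => hbd x (List.mem_cons_of_mem _ hx))]
    refine Prod.ext ?_ ?_ <;> · 
      simp only
      apply pvMap_congr
      intro i _
      by_cases hia : (i : Int) = a
      · simp [hia, hat, List.mem_cons]
      · by_cases hit : (i : Int) ∈ t <;> simp [hia, hit, List.mem_cons]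


-- ===== basic facts about sigN, smallP, bigP =====

lemma sigN_one : sigN 1 = 1 := by simp [sigN]

lemma sigN_prime {p : Nat} (hp : p.Prime) : sigN p = p + 1 := by
  unfold sigN; rw [hp.sum_divisors]

lemma sigN_mul_coprime {a b : Nat} (h : a.Coprime b) : sigN (a * b) = sigN a * sigN b := by
  have := (ArithmeticFunction.isMultiplicative_sigma (k := 1)).map_mul_of_coprime h
  simpa [ArithmeticFunction.sigma_apply, sigN] using this

lemma sigN_prime_pow {p : Nat} (hp : p.Prime) (v : Nat) :
    sigN (p ^ v) = ∑ j ∈ Finset.range (v + 1), p ^ j := by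
  unfold sigN; rw [Nat.sum_divisors_prime_pow hp]

lemma smallP_pos (i k : Nat) : 0 < smallP i k := by
  unfold smallP
  apply Finset.prod_pos
  intro p hp
  exact pow_pos (Nat.mem_primeFactors.mp (Finset.mem_filter.mp hp).1).1.pos _

lemma smallP_dvd (i k : Nat) (hi : i ≠ 0) : smallP i k ∣ i := by
  unfold smallP
  conv_rhs => rw [← Nat.factorization_prod_pow_eq_self hi]
  rw [Finsupp.prod, Nat.support_factorization]
  exact Finset.prod_dvd_prod_of_subset _ _ _ (Finset.filter_subset _ _)

lemma smallP_one (k : Nat) : smallP 1 k = 1 := by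
  unfold smallP; simp

lemma smallP_two (i : Nat) : smallP i 2 = 1 := by
  unfold smallP
  rw [Finset.filter_false_of_mem, Finset.prod_empty]
  intro p hp
  have := (Nat.mem_primeFactors.mp hp).1.two_le
  omega

lemma smallP_succ_of_not (i k : Nat) (h : ¬(k.Prime ∧ k ∣ i)) : smallP i (k + 1) = smallP i k := by
  unfold smallP
  congr 1
  ext p
  simp only [Finset.mem_filter]
  constructor
  · rintro ⟨hp, hlt⟩
    refine ⟨hp, ?_⟩
    rcases Nat.lt_or_ge p k with h' | h'
    · exact h'
    · exfalso
      have hpk : p = k := by omega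
      obtain ⟨hpp, hpd, -⟩ := Nat.mem_primeFactors.mp hp
      exact h ⟨hpk ▸ hpp, hpk ▸ hpd⟩
  · rintro ⟨hp, hlt⟩
    exact ⟨hp, by omega⟩

lemma smallP_succ_of {i k : Nat} (hi : i ≠ 0) (hk : k.Prime) (hd : k ∣ i) :
    smallP i (k + 1) = k ^ i.factorization k * smallP i k := by
  unfold smallP
  have hmem : k ∈ i.primeFactors := Nat.mem_primeFactors.mpr ⟨hk, hd, hi⟩
  have hins : i.primeFactors.filter (· < k + 1) = insert k (i.primeFactors.filter (· < k)) := by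
    ext p
    simp only [Finset.mem_insert, Finset.mem_filter]
    constructor
    · rintro ⟨hp, hlt⟩
      by_cases hpk : p = k
      · exact Or.inl hpk
      · exact Or.inr ⟨hp, by omega⟩
    · rintro (rfl | ⟨hp, hlt⟩)
      · exact ⟨hmem, by omega⟩
      · exact ⟨hp, by omega⟩
  rw [hins, Finset.prod_insert (by simp)]

lemma not_dvd_smallP {i k q : Nat} (hq : q.Prime) (hqk : ¬ q < k) : ¬ q ∣ smallP i k := by
  intro hdvd
  unfold smallP at hdvd
  obtain ⟨p, hp, hpd⟩ := hq.prime.exists_mem_finset_dvd hdvd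
  obtain ⟨hppf, hplt⟩ := Finset.mem_filter.mp hp
  have hpp := (Nat.mem_primeFactors.mp hppf).1
  have : q = p := (Nat.prime_dvd_prime_iff_eq hq hpp).mp (hq.dvd_of_dvd_pow hpd)
  omega

lemma factorization_smallP {i k q : Nat} (hi : i ≠ 0) (hq : q.Prime) (hqk : q < k) (hqd : q ∣ i) :
    (smallP i k).factorization q = i.factorization q := by
  have hmem : q ∈ i.primeFactors.filter (· < k) := by
    simp only [Finset.mem_filter, Nat.mem_primeFactors]
    exact ⟨⟨hq, hqd, hi⟩, hqk⟩
  have hrest_pos : 0 < ∏ p ∈ (i.primeFactors.filter (· < k)).erase q, p ^ i.factorization p := by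
    apply Finset.prod_pos
    intro p hp
    exact pow_pos (Nat.mem_primeFactors.mp (Finset.mem_filter.mp (Finset.mem_of_mem_erase hp)).1).1.pos _
  have hqrest : ¬ q ∣ ∏ p ∈ (i.primeFactors.filter (· < k)).erase q, p ^ i.factorization p := by
    intro hdvd
    obtain ⟨p, hp, hpd⟩ := hq.prime.exists_mem_finset_dvd hdvd
    have hpp := (Nat.mem_primeFactors.mp (Finset.mem_filter.mp (Finset.mem_of_mem_erase hp)).1).1
    have : q = p := (Nat.prime_dvd_prime_iff_eq hq hpp).mp (hq.dvd_of_dvd_pow hpd)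
    exact (Finset.ne_of_mem_erase hp) this.symm
  have hsplit : smallP i k = q ^ i.factorization q *
      ∏ p ∈ (i.primeFactors.filter (· < k)).erase q, p ^ i.factorization p := by
    unfold smallP
    exact (Finset.mul_prod_erase _ _ hmem).symm
  rw [hsplit, Nat.factorization_mul (pow_ne_zero _ hq.pos.ne') hrest_pos.ne']
  rw [Finsupp.add_apply, hq.factorization_pow, Finsupp.single_eq_same]
  have : (∏ p ∈ (i.primeFactors.filter (· < k)).erase q, p ^ i.factorization p).factorization q = 0 := by
    rw [Nat.factorization_eq_zero_iff]
    exact Or.inr (Or.inl hqrest)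
  omega

lemma bigP_mul (i k : Nat) (hi : i ≠ 0) : bigP i k * smallP i k = i :=
  Nat.div_mul_cancel (smallP_dvd i k hi)

lemma bigP_ne_zero (i k : Nat) (hi : i ≠ 0) : bigP i k ≠ 0 := by
  intro h
  have := bigP_mul i k hi
  rw [h] at this
  simp at this
  exact hi this.symm

lemma bigP_dvd (i k : Nat) (hi : i ≠ 0) : bigP i k ∣ i :=
  ⟨smallP i k, (bigP_mul i k hi).symm⟩

lemma factorization_bigP_at_k {i k : Nat} (hi : i ≠ 0) (hk : k.Prime) :
    (bigP i k).factorization k = i.factorization k := by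
  have h := bigP_mul i k hi
  have hb := bigP_ne_zero i k hi
  have hs := (smallP_pos i k).ne'
  have hfac : i.factorization k = (bigP i k).factorization k + (smallP i k).factorization k := by
    conv_lhs => rw [← h]
    rw [Nat.factorization_mul hb hs, Finsupp.add_apply]
  have hsz : (smallP i k).factorization k = 0 := by
    rw [Nat.factorization_eq_zero_iff]
    exact Or.inr (Or.inl (not_dvd_smallP hk (lt_irrefl k)))
  omega

lemma not_dvd_bigP {i k q : Nat} (hi : i ≠ 0) (hq : q.Prime) (hqk : q < k) : ¬ q ∣ bigP i k := by
  by_cases hqd : q ∣ i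
  · have h := bigP_mul i k hi
    have hb := bigP_ne_zero i k hi
    have hs := (smallP_pos i k).ne'
    have hfac : i.factorization q = (bigP i k).factorization q + (smallP i k).factorization q := by
      conv_lhs => rw [← h]
      rw [Nat.factorization_mul hb hs, Finsupp.add_apply]
    have hsf := factorization_smallP hi hq hqk hqd
    have hbz : (bigP i k).factorization q = 0 := by omega
    intro hc
    have := hq.factorization_pos_of_dvd hb hc
    omega
  · intro hc
    exact hqd (hc.trans (bigP_dvd i k hi))

lemma bigP_succ_div {i k : Nat} (hi : i ≠ 0) (hk : k.Prime) (hd : k ∣ i) :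
    bigP i k / k ^ i.factorization k = bigP i (k + 1) := by
  unfold bigP
  rw [Nat.div_div_eq_div_mul, smallP_succ_of hi hk hd, mul_comm]

lemma smallP_self_eq_one_iff {k : Nat} (hk : 2 ≤ k) : smallP k k = 1 ↔ k.Prime := by
  constructor
  · intro h1
    by_contra hnp
    have hq : k.minFac.Prime := Nat.minFac_prime (by omega)
    have hqd : k.minFac ∣ k := Nat.minFac_dvd k
    have hqle : k.minFac ≤ k := Nat.le_of_dvd (by omega) hqd
    have hqlt : k.minFac < k := by
      rcases Nat.lt_or_ge k.minFac k with h | h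
      · exact h
      · have heq : k.minFac = k := by omega
        exact absurd (heq ▸ hq) hnp
    have hmem : k.minFac ∈ k.primeFactors.filter (· < k) := by
      simp only [Finset.mem_filter, Nat.mem_primeFactors]
      exact ⟨⟨hq, hqd, by omega⟩, hqlt⟩
    have hdvd : k.minFac ^ k.factorization k.minFac ∣ smallP k k := by
      unfold smallP
      exact Finset.dvd_prod_of_mem _ hmem
    have hv : 0 < k.factorization k.minFac := hq.factorization_pos_of_dvd (by omega) hqd
    rw [h1] at hdvd
    have heq1 := Nat.dvd_one.mp hdvd
    have : k.minFac ≤ k.minFac ^ k.factorization k.minFac :=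
      Nat.le_self_pow hv.ne' _
    have := hq.two_le
    omega
  · intro hk'
    unfold smallP
    rw [hk'.primeFactors]
    rw [Finset.filter_false_of_mem (by intro p hp; simp only [Finset.mem_singleton] at hp; omega),
      Finset.prod_empty]

lemma bigP_self_eq_iff {k : Nat} (hk : 2 ≤ k) : bigP k k = k ↔ k.Prime := by
  rw [← smallP_self_eq_one_iff hk]
  unfold bigP
  constructor
  · intro h
    rcases Nat.div_eq_self.mp h with h0 | h1
    · omega
    · exact h1
  · intro h
    rw [h, Nat.div_one]


-- ===== prime_pow_sum: the while-loop strips the full power of P and accumulates σ(P^v) =====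

lemma pps_spec {P : Nat} (hp : P.Prime) (v : Nat) : ∀ (m : Nat), 0 < m → m.factorization P = v → ∀ s : Int,
    primePowSumGo (P : Int) (m : Int) s =
      (s * (P : Int) ^ v + ((∑ j ∈ Finset.range v, P ^ j : Nat) : Int), ((m / P ^ v : Nat) : Int)) := by
  induction v with
  | zero =>
    intro m hm hv s
    rw [primePowSumGo, dif_neg]
    · simp
    · rintro ⟨-, -, hmod⟩
      rw [PySem.Int.mod_eq_zero_iff_dvd, Int.natCast_dvd_natCast] at hmod
      have := hp.factorization_pos_of_dvd (by omega) hmod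
      omega
  | succ v ih =>
    intro m hm hv s
    have hdvd : P ∣ m := by
      by_contra hnd
      rw [Nat.factorization_eq_zero_of_not_dvd hnd] at hv
      omega
    have hP2 := hp.two_le
    rw [primePowSumGo, dif_pos ⟨by exact_mod_cast hP2, by exact_mod_cast hm,
      by rw [PySem.Int.mod_eq_zero_iff_dvd, Int.natCast_dvd_natCast]; exact hdvd⟩]
    rw [PySem.Int.floordiv_natCast]
    have hmP : 0 < m / P := Nat.div_pos (Nat.le_of_dvd hm hdvd) hp.pos
    have hfv : (m / P).factorization P = v := by
      rw [Nat.factorization_div hdvd]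
      have h1 : P.factorization P = 1 := hp.factorization_self
      simp only [Finsupp.tsub_apply, hv, h1]
      omega
    rw [ih (m / P) hmP hfv (s * P + 1)]
    simp only [Prod.mk.injEq]
    refine ⟨?_, ?_⟩
    · -- (s*P+1) * P^v + Σ_{j<v} P^j = s * P^(v+1) + Σ_{j<v+1} P^j
      rw [Finset.sum_range_succ]
      push_cast
      ring
    · rw [Nat.div_div_eq_div_mul, ← pow_succ']

-- ===== endgame facts =====

-- B's sieve total: 1 plus the sum of the divisors 2..n-1 of i is σ(i)
lemma sum_div_eq_sigN {i n' : Nat} (h2 : 2 ≤ i) (hin : i < n') :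
    1 + ∑ d ∈ Finset.Ico 2 n', (if d ∣ i ∧ 0 < i then (d : Int) else 0) = ((sigN i : Nat) : Int) := by
  have h0 : 0 < i := by omega
  have hcong : ∀ d ∈ Finset.Ico 2 n', (if d ∣ i ∧ 0 < i then (d : Int) else 0) = (if d ∣ i then (d : Int) else 0) := by
    intro d _
    simp [h0]
  rw [Finset.sum_congr rfl hcong, ← Finset.sum_filter]
  have hset : (Finset.Ico 2 n').filter (· ∣ i) = i.divisors.erase 1 := by
    ext d
    simp only [Finset.mem_filter, Finset.mem_Ico, Finset.mem_erase, Nat.mem_divisors]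
    constructor
    · rintro ⟨⟨h2d, hdn⟩, hdi⟩
      exact ⟨by omega, hdi, by omega⟩
    · rintro ⟨hne, hdi, -⟩
      have hd0 : 0 < d := Nat.pos_of_dvd_of_pos hdi h0
      have hdle : d ≤ i := Nat.le_of_dvd h0 hdi
      exact ⟨⟨by omega, by omega⟩, hdi⟩
  rw [hset]
  have h1m : (1 : Nat) ∈ i.divisors := Nat.one_mem_divisors.mpr (by omega)
  have hmain : 1 + ∑ d ∈ i.divisors.erase 1, d = sigN i := by
    unfold sigN
    exact Finset.add_sum_erase i.divisors (fun d => d) h1m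
  push_cast [← hmain]
  ring

-- every prime factor of the final cofactor is > √n'
lemma bigP_primeFactor_large {n' i q : Nat} (h2 : 2 ≤ i) (hin : i < n') (hq : q.Prime)
    (hqd : q ∣ bigP i (Nat.sqrt n' + 1)) : Nat.sqrt n' + 1 ≤ q := by
  by_contra h
  exact not_dvd_bigP (by omega) hq (by omega) hqd

lemma bigP_final_one_or_prime {n' i : Nat} (h2 : 2 ≤ i) (hin : i < n') :
    bigP i (Nat.sqrt n' + 1) = 1 ∨ (bigP i (Nat.sqrt n' + 1)).Prime := by
  by_cases h1 : bigP i (Nat.sqrt n' + 1) = 1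
  · exact Or.inl h1
  right
  by_contra hnp
  have hi0 : i ≠ 0 := by omega
  have hr0 : bigP i (Nat.sqrt n' + 1) ≠ 0 := bigP_ne_zero i _ hi0
  have hrdvd : bigP i (Nat.sqrt n' + 1) ∣ i := bigP_dvd i _ hi0
  have hrle : bigP i (Nat.sqrt n' + 1) ≤ i := Nat.le_of_dvd (by omega) hrdvd
  have hq : (bigP i (Nat.sqrt n' + 1)).minFac.Prime := Nat.minFac_prime h1
  have hqd := Nat.minFac_dvd (bigP i (Nat.sqrt n' + 1))
  have hqK : Nat.sqrt n' + 1 ≤ (bigP i (Nat.sqrt n' + 1)).minFac :=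
    bigP_primeFactor_large h2 hin hq hqd
  have hr' : bigP i (Nat.sqrt n' + 1) / (bigP i (Nat.sqrt n' + 1)).minFac ≠ 1 := by
    intro h
    have hm := Nat.div_mul_cancel hqd
    rw [h, one_mul] at hm
    exact hnp (hm ▸ hq)
  have hr'0 : bigP i (Nat.sqrt n' + 1) / (bigP i (Nat.sqrt n' + 1)).minFac ≠ 0 := by
    intro h
    have hm := Nat.div_mul_cancel hqd
    rw [h, zero_mul] at hm
    exact hr0 hm.symm
  have hq' : (bigP i (Nat.sqrt n' + 1) / (bigP i (Nat.sqrt n' + 1)).minFac).minFac.Prime :=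
    Nat.minFac_prime hr'
  have hq'd : (bigP i (Nat.sqrt n' + 1) / (bigP i (Nat.sqrt n' + 1)).minFac).minFac ∣ bigP i (Nat.sqrt n' + 1) :=
    (Nat.minFac_dvd _).trans (Nat.div_dvd_of_dvd hqd)
  have hq'K : Nat.sqrt n' + 1 ≤ (bigP i (Nat.sqrt n' + 1) / (bigP i (Nat.sqrt n' + 1)).minFac).minFac :=
    bigP_primeFactor_large h2 hin hq' hq'd
  have hpos : 0 < bigP i (Nat.sqrt n' + 1) / (bigP i (Nat.sqrt n' + 1)).minFac :=
    Nat.pos_of_ne_zero hr'0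
  have hq'le : (bigP i (Nat.sqrt n' + 1) / (bigP i (Nat.sqrt n' + 1)).minFac).minFac ≤
      bigP i (Nat.sqrt n' + 1) / (bigP i (Nat.sqrt n' + 1)).minFac := Nat.minFac_le hpos
  have hprod : (bigP i (Nat.sqrt n' + 1)).minFac * (bigP i (Nat.sqrt n' + 1) / (bigP i (Nat.sqrt n' + 1)).minFac)
      = bigP i (Nat.sqrt n' + 1) := Nat.mul_div_cancel' hqd
  have hsq : n' < (Nat.sqrt n' + 1) * (Nat.sqrt n' + 1) := Nat.lt_succ_sqrt n'
  have hbig : (Nat.sqrt n' + 1) * (Nat.sqrt n' + 1) ≤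
      (bigP i (Nat.sqrt n' + 1)).minFac * (bigP i (Nat.sqrt n' + 1) / (bigP i (Nat.sqrt n' + 1)).minFac) :=
    Nat.mul_le_mul hqK (le_trans hq'K hq'le)
  omega

lemma A_final_val {n' i : Nat} (h2 : 2 ≤ i) (hin : i < n') :
    (if (bigP i (Nat.sqrt n' + 1) : Int) ≠ 1 then
        ((sigN (smallP i (Nat.sqrt n' + 1)) : Nat) : Int) * ((bigP i (Nat.sqrt n' + 1) : Int) + 1)
      else ((sigN (smallP i (Nat.sqrt n' + 1)) : Nat) : Int)) = ((sigN i : Nat) : Int) := by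
  have hi0 : i ≠ 0 := by omega
  rcases bigP_final_one_or_prime h2 hin with h1 | hpr
  · rw [h1, if_neg (by simp)]
    have hsm : smallP i (Nat.sqrt n' + 1) = i := by
      have h := bigP_mul i (Nat.sqrt n' + 1) hi0
      rw [h1, one_mul] at h
      exact h
    rw [hsm]
  · have hne : bigP i (Nat.sqrt n' + 1) ≠ 1 := hpr.one_lt.ne'
    rw [if_pos (by exact_mod_cast hne)]
    have hrK : Nat.sqrt n' + 1 ≤ bigP i (Nat.sqrt n' + 1) :=
      bigP_primeFactor_large h2 hin hpr dvd_rfl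
    have hco : (smallP i (Nat.sqrt n' + 1)).Coprime (bigP i (Nat.sqrt n' + 1)) :=
      Nat.Coprime.symm ((hpr.coprime_iff_not_dvd).mpr (not_dvd_smallP hpr (by omega)))
    have hmul : sigN i = sigN (smallP i (Nat.sqrt n' + 1)) * sigN (bigP i (Nat.sqrt n' + 1)) := by
      conv_lhs => rw [← bigP_mul i (Nat.sqrt n' + 1) hi0, mul_comm]
      exact sigN_mul_coprime hco
    rw [hmul, sigN_prime hpr]
    push_cast
    ring


-- ===== the two sieves as pvMap transformations =====

lemma pvMap_const_one (n' : Nat) : List.replicate n' (1 : Int) = pvMap n' (fun _ => 1) := by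
  unfold pvMap
  rw [List.map_const', List.length_range]

lemma mem_step_range {k n' : Nat} (i : Nat) (hk : 2 ≤ k) (hi : i < n') :
    ((i : Int) ∈ PySem.List.pyRange (k : Int) (n' : Int) (k : Int)) ↔ (k ∣ i ∧ 0 < i) := by
  rw [PySem.List.mem_pyRange_iff_of_pos (by exact_mod_cast (by omega : 0 < k))]
  constructor
  · rintro ⟨h1, h2, h3⟩
    have hdvd : (k : Int) ∣ (i : Int) := by
      have := dvd_add h3 (dvd_refl (k : Int))
      simpa using this
    rw [Int.natCast_dvd_natCast] at hdvd
    exact ⟨hdvd, by omega⟩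
  · rintro ⟨h1, h2⟩
    have hle : k ≤ i := Nat.le_of_dvd h2 h1
    refine ⟨by exact_mod_cast hle, by exact_mod_cast hi, ?_⟩
    exact dvd_sub (Int.natCast_dvd_natCast.mpr h1) (dvd_refl _)

lemma bd_step_range {k n' : Nat} (hk : 1 ≤ k) :
    ∀ x ∈ PySem.List.pyRange (k : Int) (n' : Int) (k : Int), 0 ≤ x ∧ x.toNat < n' := by
  intro x hx
  rw [PySem.List.mem_pyRange_iff_of_pos (by exact_mod_cast hk : (0:Int) < (k:Int))] at hx
  obtain ⟨h1, h2, -⟩ := hx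
  omega

lemma bd_one_range (n' : Nat) : ∀ x ∈ PySem.List.pyRange 2 (n' : Int) 1, 0 ≤ x ∧ x.toNat < n' := by
  intro x hx
  rw [PySem.List.mem_pyRange_one] at hx
  omega

-- B's running value: 1 plus the contributions of the outer passes d = 2 .. k-1
def gBf (n' k i : Nat) : Int := 1 + ∑ d ∈ Finset.Ico 2 k, (if d ∣ i ∧ 0 < i then (d : Int) else 0)

-- A's running values after the primes < k have been processed
def gNf (k i : Nat) : Int := if i = 0 then 0 else (bigP i k : Int)
def gFf (k i : Nat) : Int := if i = 0 then 1 else ((sigN (smallP i k) : Nat) : Int)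

lemma B_loop (n' : Nat) : ∀ k, 2 ≤ k → k ≤ n' →
    (PySem.List.pyRange 2 (k : Int) 1).foldl
      (fun fs d => (PySem.List.pyRange d (n' : Int) d).foldl
        (fun fs j => PySem.List.pySetD fs j (PySem.List.pyGetD fs j 0 + d)) fs)
      (pvMap n' (fun _ => 1)) = pvMap n' (gBf n' k) := by
  intro k
  induction k with
  | zero => omega
  | succ k ih =>
    intro hk2 hkn
    by_cases hke : k + 1 = 2
    · have hk1 : k = 1 := by omega
      subst hk1
      rw [show (((1:Nat) + 1 : Nat) : Int) = 2 by norm_num,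
        PySem.List.pyRange_one_eq_nil (by norm_num), List.foldl_nil]
      apply pvMap_congr
      intro i hi
      simp [gBf]
    · have hk : 2 ≤ k := by omega
      have hcast : (((k + 1 : Nat)) : Int) = ((k : Nat) : Int) + 1 := by push_cast; ring
      rw [hcast, PySem.List.pyRange_one_succ_right (by exact_mod_cast hk : (2:Int) ≤ (k:Int)),
        List.foldl_append, ih hk (by omega), List.foldl_cons, List.foldl_nil]
      rw [loop1 n' _ _ (fun j x => x + (k : Int))
        (nodup_pyRange_pos _ _ _ (by exact_mod_cast (by omega : 0 < k)))
        (bd_step_range (by omega))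
        (by
          intro g j h0 h1
          rw [pvMap_get n' g j h0 h1, pvMap_set n' g j _ h0 h1]
          apply pvMap_congr
          intro i hi
          by_cases hij : (i : Int) = j
          · rw [if_pos hij, if_pos hij]
            have hij' : i = j.toNat := by omega
            rw [hij']
          · rw [if_neg hij, if_neg hij])
        (gBf n' k)]
      apply pvMap_congr
      intro i hi
      unfold gBf
      rw [Finset.sum_Ico_succ_top hk]
      by_cases hc : k ∣ i ∧ 0 < i
      · rw [if_pos ((mem_step_range i hk hi).mpr hc), if_pos hc]
        ring
      · rw [if_neg (fun hm => hc ((mem_step_range i hk hi).mp hm)), if_neg hc]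
        ring

lemma B_eq (n' : Nat) (incl : Bool) :
    calc_sum_divisors_alt (n' : Int) incl
      = pvMap n' (fun i => if 2 ≤ i ∧ incl = false then gBf n' n' i - (i : Int) else gBf n' n' i) := by
  unfold calc_sum_divisors_alt
  dsimp only
  rw [PySem.List.pyRepeat_singleton, Int.toNat_natCast, pvMap_const_one]
  have hsub : ∀ g : Nat → Int,
      (PySem.List.pyRange 2 ((n' : Nat) : Int) 1).foldl
        (fun fs i => PySem.List.pySetD fs i (PySem.List.pyGetD fs i 0 - i)) (pvMap n' g)
      = pvMap n' (fun i => if (i : Int) ∈ PySem.List.pyRange 2 ((n' : Nat) : Int) 1 then g i - (i : Int) else g i) := by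
    intro g
    exact loop1 n' _ _ (fun j x => x - j)
      (nodup_pyRange_pos _ _ _ one_pos)
      (bd_one_range n')
      (by
        intro g j h0 h1
        rw [pvMap_get n' g j h0 h1, pvMap_set n' g j _ h0 h1]
        apply pvMap_congr
        intro i hi
        by_cases hij : (i : Int) = j
        · rw [if_pos hij, if_pos hij]
          have hij' : i = j.toNat := by omega
          rw [hij']
        · rw [if_neg hij, if_neg hij]) g
  by_cases h2 : 2 ≤ n'
  · rw [B_loop n' n' h2 le_rfl]
    cases incl with
    | true =>
      simp only [Bool.not_true, Bool.false_eq_true, if_false]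
      apply pvMap_congr
      intro i hi
      simp
    | false =>
      simp only [Bool.not_false, if_true]
      rw [hsub]
      apply pvMap_congr
      intro i hi
      by_cases hc : 2 ≤ i
      · rw [if_pos (by rw [PySem.List.mem_pyRange_one]; constructor <;> [exact_mod_cast hc; exact_mod_cast hi]),
          if_pos ⟨hc, trivial⟩]
      · rw [if_neg (by rw [PySem.List.mem_pyRange_one]; intro h; exact hc (by exact_mod_cast h.1)),
          if_neg (by rintro ⟨h, -⟩; exact hc h)]
  · have hnil : PySem.List.pyRange 2 ((n' : Nat) : Int) 1 = [] :=
      PySem.List.pyRange_one_eq_nil (by exact_mod_cast (by omega : n' ≤ 2))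
    rw [hnil]
    simp only [List.foldl_nil]
    have hgB : ∀ i, i < n' → gBf n' n' i = 1 := by
      intro i hi
      unfold gBf
      rw [Finset.Ico_eq_empty (by omega), Finset.sum_empty]
      ring
    cases incl with
    | true =>
      simp only [Bool.not_true, Bool.false_eq_true, if_false]
      apply pvMap_congr
      intro i hi
      simp [hgB i hi]
    | false =>
      simp only [Bool.not_false, if_true]
      apply pvMap_congr
      intro i hi
      rw [if_neg (by rintro ⟨h, -⟩; omega), hgB i hi]


lemma A_loop (n' : Nat) (h2 : 2 ≤ n') : ∀ k, 2 ≤ k → k ≤ Nat.sqrt n' + 1 →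
    (PySem.List.pyRange 2 (k : Int) 1).foldl
      (fun (st : List Int × List Int) p =>
        if PySem.List.pyGetD st.1 p 0 = p then
          (PySem.List.pyRange p (n' : Int) p).foldl
            (fun (st2 : List Int × List Int) j =>
              (PySem.List.pySetD st2.1 j (primePowSumGo p (PySem.List.pyGetD st2.1 j 0) 1).2,
               PySem.List.pySetD st2.2 j
                 (PySem.List.pyGetD st2.2 j 0 * (primePowSumGo p (PySem.List.pyGetD st2.1 j 0) 1).1))) st
        else st)
      (pvMap n' (fun i => (i : Int)), pvMap n' (fun _ => 1))
    = (pvMap n' (gNf k), pvMap n' (gFf k)) := by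
  intro k
  induction k with
  | zero => omega
  | succ k ih =>
    intro hk2 hkK
    by_cases hke : k + 1 = 2
    · have hk1 : k = 1 := by omega
      subst hk1
      rw [show (((1:Nat) + 1 : Nat) : Int) = 2 by norm_num,
        PySem.List.pyRange_one_eq_nil (by norm_num), List.foldl_nil]
      refine Prod.ext ?_ ?_ <;> (apply pvMap_congr; intro i hi)
      · by_cases hi0 : i = 0
        · simp [gNf, hi0]
        · unfold gNf bigP
          rw [if_neg hi0, smallP_two, Nat.div_one]
      · by_cases hi0 : i = 0
        · simp [gFf, hi0]
        · unfold gFf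
          rw [if_neg hi0, smallP_two, sigN_one]
          norm_num
    · have hk : 2 ≤ k := by omega
      have hkn : k < n' := by
        have := Nat.sqrt_lt_self (by omega : 1 < n')
        omega
      have hcast : (((k + 1 : Nat)) : Int) = ((k : Nat) : Int) + 1 := by push_cast; ring
      rw [hcast, PySem.List.pyRange_one_succ_right (by exact_mod_cast hk),
        List.foldl_append, ih hk (by omega), List.foldl_cons, List.foldl_nil]
      have hget : PySem.List.pyGetD (pvMap n' (gNf k), pvMap n' (gFf k)).1 ((k:Nat):Int) 0
          = ((bigP k k : Nat) : Int) := by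
        rw [pvMap_get n' _ _ (by omega) (by simpa using hkn)]
        unfold gNf
        rw [Int.toNat_natCast, if_neg (by omega : ¬ k = 0)]
      rw [hget]
      by_cases hkP : k.Prime
      · rw [if_pos (by rw [(bigP_self_eq_iff hk).mpr hkP])]
        rw [loop2 n' _ _
          (fun j xy => ((primePowSumGo ((k:Nat):Int) xy.1 1).2,
                        xy.2 * (primePowSumGo ((k:Nat):Int) xy.1 1).1))
          (nodup_pyRange_pos _ _ _ (by exact_mod_cast (by omega : 0 < k)))
          (bd_step_range (by omega))
          (by
            intro gN gF j h0 h1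
            dsimp only
            rw [pvMap_get n' gN j h0 h1, pvMap_get n' gF j h0 h1,
              pvMap_set n' gN j _ h0 h1, pvMap_set n' gF j _ h0 h1]
            refine Prod.ext ?_ ?_ <;>
              (dsimp only
               apply pvMap_congr
               intro i hi
               by_cases hij : (i : Int) = j
               · rw [if_pos hij, if_pos hij]
                 have hij' : i = j.toNat := by omega
                 rw [hij']
               · rw [if_neg hij, if_neg hij]))
          (gNf k) (gFf k)]
        refine Prod.ext ?_ ?_ <;> (dsimp only; apply pvMap_congr; intro i hi)
        · by_cases hm : k ∣ i ∧ 0 < i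
          · have hi0 : i ≠ 0 := by omega
            have hb0 : 0 < bigP i k := Nat.pos_of_ne_zero (bigP_ne_zero i k hi0)
            have hfb := factorization_bigP_at_k hi0 hkP
            rw [if_pos ((mem_step_range i hk hi).mpr hm)]
            unfold gNf
            rw [if_neg hi0, if_neg hi0,
              pps_spec hkP (i.factorization k) (bigP i k) hb0 hfb 1]
            dsimp only
            rw [bigP_succ_div hi0 hkP hm.1]
          · rw [if_neg (fun hmem => hm ((mem_step_range i hk hi).mp hmem))]
            by_cases hi0 : i = 0
            · simp [gNf, hi0]
            · have hnd : ¬ (k.Prime ∧ k ∣ i) := fun h => hm ⟨h.2, by omega⟩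
              unfold gNf bigP
              rw [smallP_succ_of_not i k hnd]
        · by_cases hm : k ∣ i ∧ 0 < i
          · have hi0 : i ≠ 0 := by omega
            have hb0 : 0 < bigP i k := Nat.pos_of_ne_zero (bigP_ne_zero i k hi0)
            have hfb := factorization_bigP_at_k hi0 hkP
            rw [if_pos ((mem_step_range i hk hi).mpr hm)]
            unfold gNf gFf
            rw [if_neg hi0, if_neg hi0, if_neg hi0,
              pps_spec hkP (i.factorization k) (bigP i k) hb0 hfb 1]
            dsimp only
            have hsig : (1 : Int) * ((k:Nat):Int) ^ (i.factorization k)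
                + ((∑ j ∈ Finset.range (i.factorization k), k ^ j : Nat) : Int)
                = ((sigN (k ^ i.factorization k) : Nat) : Int) := by
              rw [sigN_prime_pow hkP, Finset.sum_range_succ]
              push_cast
              ring
            rw [hsig, smallP_succ_of hi0 hkP hm.1]
            have hco : (k ^ i.factorization k).Coprime (smallP i k) :=
              Nat.Coprime.pow_left _ ((hkP.coprime_iff_not_dvd).mpr (not_dvd_smallP hkP (lt_irrefl k)))
            rw [sigN_mul_coprime hco]
            push_cast
            ring
          · rw [if_neg (fun hmem => hm ((mem_step_range i hk hi).mp hmem))]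
            by_cases hi0 : i = 0
            · simp [gFf, hi0]
            · have hnd : ¬ (k.Prime ∧ k ∣ i) := fun h => hm ⟨h.2, by omega⟩
              unfold gFf
              rw [smallP_succ_of_not i k hnd]
      · rw [if_neg (by intro h; exact hkP ((bigP_self_eq_iff hk).mp (by exact_mod_cast h)))]
        have hnd : ∀ i, ¬ (k.Prime ∧ k ∣ i) := fun i h => hkP h.1
        refine Prod.ext ?_ ?_ <;> (dsimp only; apply pvMap_congr; intro i hi)
        · by_cases hi0 : i = 0
          · simp [gNf, hi0]
          · unfold gNf bigP
            rw [smallP_succ_of_not i k (hnd i)]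
        · by_cases hi0 : i = 0
          · simp [gFf, hi0]
          · unfold gFf
            rw [smallP_succ_of_not i k (hnd i)]



lemma A_eq (n' : Nat) (incl : Bool) :
    calc_sum_divisors ((n' : Nat) : Int) incl
      = pvMap n' (fun i =>
          if 2 ≤ i then
            (if gNf (Nat.sqrt n' + 1) i ≠ 1 then
                gFf (Nat.sqrt n' + 1) i * (gNf (Nat.sqrt n' + 1) i + 1)
              else gFf (Nat.sqrt n' + 1) i) - (if incl then 0 else (i : Int))
          else gFf (Nat.sqrt n' + 1) i) := by
  unfold calc_sum_divisors
  dsimp only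
  rw [PySem.List.pyRepeat_singleton]
  simp only [Int.toNat_natCast]
  rw [pvMap_const_one,
    show PySem.List.pyRange 0 ((n' : Nat) : Int) 1 = pvMap n' (fun i => (i : Int)) from by
      rw [PySem.List.pyRange_zero_nat]; rfl,
    show ((Nat.sqrt n' : Nat) : Int) + 1 = ((Nat.sqrt n' + 1 : Nat) : Int) from by push_cast; ring]
  have hfin : ∀ gN gF : Nat → Int,
      (PySem.List.pyRange 2 ((n' : Nat) : Int) 1).foldl
        (fun fs i =>
          if incl = true then
            (if PySem.List.pyGetD (pvMap n' gN) i 0 ≠ 1 then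
                PySem.List.pySetD fs i
                  (PySem.List.pyGetD fs i 0 * (PySem.List.pyGetD (pvMap n' gN) i 0 + 1))
              else fs)
          else
            PySem.List.pySetD
              (if PySem.List.pyGetD (pvMap n' gN) i 0 ≠ 1 then
                  PySem.List.pySetD fs i
                    (PySem.List.pyGetD fs i 0 * (PySem.List.pyGetD (pvMap n' gN) i 0 + 1))
                else fs) i
              (PySem.List.pyGetD
                (if PySem.List.pyGetD (pvMap n' gN) i 0 ≠ 1 then
                    PySem.List.pySetD fs i
                      (PySem.List.pyGetD fs i 0 * (PySem.List.pyGetD (pvMap n' gN) i 0 + 1))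
                  else fs) i 0 - i))
        (pvMap n' gF)
      = pvMap n' (fun i => if (i : Int) ∈ PySem.List.pyRange 2 ((n' : Nat) : Int) 1 then
          (if gN i ≠ 1 then gF i * (gN i + 1) else gF i) - (if incl then 0 else (i : Int))
        else gF i) := by
    intro gN gF
    refine loop1 n' _ _
      (fun j x => (if gN j.toNat ≠ 1 then x * (gN j.toNat + 1) else x) - (if incl then 0 else j))
      (nodup_pyRange_pos _ _ _ one_pos) (bd_one_range n') ?_ gF
    intro g j h0 h1
    dsimp only
    rw [pvMap_get n' gN j h0 h1]
    by_cases hc : gN j.toNat ≠ 1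
    · rw [if_pos hc, pvMap_get n' g j h0 h1, pvMap_set n' g j _ h0 h1]
      cases incl with
      | true =>
        rw [if_pos rfl]
        apply pvMap_congr
        intro i hi
        by_cases hij : (i : Int) = j
        · have hij' : i = j.toNat := by omega
          simp [hij, hij', hc]
        · simp [hij]
      | false =>
        rw [if_neg (by simp)]
        rw [pvMap_get n' _ j h0 h1, pvMap_set n' _ j _ h0 h1]
        apply pvMap_congr
        intro i hi
        by_cases hij : (i : Int) = j
        · have hij' : i = j.toNat := by omega
          have hjj : ((j.toNat : Nat) : Int) = j := by omega
          simp [hij, hij', hjj, hc]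
        · simp [hij]
    · rw [if_neg hc]
      cases incl with
      | true =>
        rw [if_pos rfl]
        apply pvMap_congr
        intro i hi
        by_cases hij : (i : Int) = j
        · have hij' : i = j.toNat := by omega
          simp [hij, hij', hc]
        · simp [hij]
      | false =>
        rw [if_neg (by simp)]
        rw [pvMap_get n' g j h0 h1, pvMap_set n' g j _ h0 h1]
        apply pvMap_congr
        intro i hi
        by_cases hij : (i : Int) = j
        · have hij' : i = j.toNat := by omega
          simp [hij, hij', hc]
        · simp [hij]
  by_cases h2 : 2 ≤ n'
  · have hs1 : 1 ≤ Nat.sqrt n' := by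
      have h := Nat.sqrt_le_sqrt (by omega : 1 ≤ n')
      rw [Nat.sqrt_one] at h
      exact h
    rw [A_loop n' h2 (Nat.sqrt n' + 1) (by omega) le_rfl]
    dsimp only
    rw [hfin (gNf (Nat.sqrt n' + 1)) (gFf (Nat.sqrt n' + 1))]
    apply pvMap_congr
    intro i hi
    by_cases hc2 : 2 ≤ i
    · rw [if_pos (by rw [PySem.List.mem_pyRange_one]; constructor <;> [exact_mod_cast hc2; exact_mod_cast hi]),
        if_pos hc2]
    · rw [if_neg (by rw [PySem.List.mem_pyRange_one]; intro h; exact hc2 (by exact_mod_cast h.1)),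
        if_neg hc2]
  · have hsq : Nat.sqrt n' + 1 ≤ 2 := by
      have := Nat.sqrt_le_self n'
      omega
    rw [PySem.List.pyRange_one_eq_nil (by exact_mod_cast hsq : ((Nat.sqrt n' + 1 : Nat) : Int) ≤ 2),
      List.foldl_nil,
      PySem.List.pyRange_one_eq_nil (by exact_mod_cast (by omega : n' ≤ 2) : ((n' : Nat) : Int) ≤ 2),
      List.foldl_nil]
    apply pvMap_congr
    intro i hi
    have hi0 : i = 0 := by omega
    subst hi0
    rw [if_neg (by omega)]
    unfold gFf
    rw [if_pos rfl]


-- ===== VERDICT (by name: the statement is the Claim_ definition above) =====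
theorem calc_sum_divisors_spec : Claim_equal_calc_sum_divisors := by
  unfold Claim_equal_calc_sum_divisors
  intro n incl hdom hpre
  unfold Spec_calc_sum_divisors
  unfold Pre_calc_sum_divisors at hpre
  obtain ⟨n', rfl⟩ : ∃ n' : Nat, n = (n' : Int) := ⟨n.toNat, (Int.toNat_of_nonneg hpre).symm⟩
  rw [A_eq n' incl, B_eq n' incl]
  apply pvMap_congr
  intro i hi
  by_cases hc2 : 2 ≤ i
  · have hgN : gNf (Nat.sqrt n' + 1) i = ((bigP i (Nat.sqrt n' + 1) : Nat) : Int) :=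
      if_neg (by omega)
    have hgF : gFf (Nat.sqrt n' + 1) i = ((sigN (smallP i (Nat.sqrt n' + 1)) : Nat) : Int) :=
      if_neg (by omega)
    have hgB : gBf n' n' i = ((sigN i : Nat) : Int) := by
      unfold gBf
      exact sum_div_eq_sigN hc2 hi
    rw [if_pos hc2, hgN, hgF]
    have hA := A_final_val (n' := n') hc2 hi
    cases incl with
    | true =>
      rw [if_neg (show ¬ (2 ≤ i ∧ (true = false)) from by simp), hgB, ← hA,
        if_pos (show (true = true) from rfl), sub_zero]
    | false =>
      rw [if_pos (show (2 ≤ i ∧ (false = false)) from ⟨hc2, rfl⟩), hgB, ← hA,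
        if_neg (show ¬ (false = true) from by simp)]
  · rw [if_neg hc2, if_neg (fun h => hc2 h.1)]
    rcases (by omega : i = 0 ∨ i = 1) with rfl | rfl
    · unfold gFf gBf
      simp
    · unfold gFf gBf
      rw [if_neg one_ne_zero, smallP_one, sigN_one]
      have hz : ∀ d ∈ Finset.Ico 2 n', (if d ∣ 1 ∧ 0 < 1 then (d : Int) else 0) = 0 := by
        intro d hd
        rw [if_neg]
        rintro ⟨hdvd, -⟩
        have h1 := Nat.le_of_dvd one_pos hdvd
        have h2 := (Finset.mem_Ico.mp hd).1
        omega
      rw [Finset.sum_congr rfl hz, Finset.sum_const_zero]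
      norm_num
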